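-- pv_equiv track=rewrite | github.com/azamat06bekes/PP2_LABS | Lab3/functions1_8.py | has_007
-- ===== SOURCE A (Python) =====
-- def has_007(numbers):
--     for i in range(len(numbers)-1):
--         found_0 = False
--         found_00 = False
--         for num in numbers:
--             if(num == 0 and not found_0):
--                 found_0 = True
--             elif(num == 0 and found_0 and not found_00):
--                 found_00 = True
--             elif(num == 7 and found_00):
--                 return True
--     return False
-- ===== SOURCE B (Python) =====
-- def has_007(numbers):
--     state = 0
--     for num in numbers:
--         if state < 2:
--             if num == 0:
--                 state += 1
--         elif num == 7:
--             return True
--     return False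
-- ===== Notes on version B (the rewrite author's own statement) =====
-- stated objective: faster
-- what changed: Replaced A's redundant outer loop (which rescans the whole list up to len-1 times with the same flags) by a single state-machine pass counting the two zeros and then looking for a 7.
import Mathlib
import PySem

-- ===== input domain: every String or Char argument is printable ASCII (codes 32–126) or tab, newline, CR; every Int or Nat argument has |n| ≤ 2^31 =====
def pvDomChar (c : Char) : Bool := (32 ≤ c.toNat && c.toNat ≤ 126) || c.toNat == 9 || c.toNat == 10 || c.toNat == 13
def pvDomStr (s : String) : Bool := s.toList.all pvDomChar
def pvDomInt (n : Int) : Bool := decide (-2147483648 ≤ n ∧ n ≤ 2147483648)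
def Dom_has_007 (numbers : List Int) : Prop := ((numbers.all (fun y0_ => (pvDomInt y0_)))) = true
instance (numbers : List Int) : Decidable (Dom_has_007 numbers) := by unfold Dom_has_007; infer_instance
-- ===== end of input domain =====

-- B replaces A's O(n^2) redundant rescans with one O(n) state-machine pass (faster, asymptotic).


-- ===== PORT A =====
-- inner 'for num in numbers' loop of A, with flags found_0 / found_00
def has_007_inner : List Int → Bool → Bool → Bool
  | [], _, _ => false
  | num :: rest, found_0, found_00 =>
    if num == 0 && !found_0 then has_007_inner rest true found_00
    else if num == 0 && found_0 && !found_00 then has_007_inner rest found_0 true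
    else if num == 7 && found_00 then true
    else has_007_inner rest found_0 found_00

-- outer 'for i in range(len(numbers)-1)' loop; 'any' stops at the first True like A's return
def has_007 (numbers : List Int) : Bool :=
  (PySem.List.pyRange 0 ((numbers.length : Int) - 1) 1).any
    (fun _ => has_007_inner numbers false false)

-- ===== PORT B =====
-- single pass: state counts zeros seen (capped at 2), then looks for a 7
def has_007_alt_go : List Int → Int → Bool
  | [], _ => false
  | num :: rest, state =>
    if state < 2 then has_007_alt_go rest (if num == 0 then state + 1 else state)
    else if num == 7 then true
    else has_007_alt_go rest state

def has_007_alt (numbers : List Int) : Bool := has_007_alt_go numbers 0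

-- ===== PRECONDITION & SPEC =====
def Spec_has_007 (numbers : List Int) (out : Bool) : Prop := out = has_007_alt numbers
instance (numbers : List Int) (out : Bool) : Decidable (Spec_has_007 numbers out) := by unfold Spec_has_007; infer_instance

-- ===== CLAIM (what is proved, stated in full; the proofs are below) =====
def Claim_equal_has_007 : Prop := ∀ (numbers : List Int), Dom_has_007 numbers → Spec_has_007 numbers (has_007 numbers)

-- ===== LEMMAS AND PROOFS =====

-- flag pairs reachable in A's inner loop map to B's state: (ff,ff)↦0, (tt,ff)↦1, (tt,tt)↦2
lemma inner_eq_go (l : List Int) (f0 f00 : Bool) (h : f00 = true → f0 = true) :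
    has_007_inner l f0 f00 = has_007_alt_go l (cond f00 2 (cond f0 1 0)) := by
  induction l generalizing f0 f00 with
  | nil => simp [has_007_inner, has_007_alt_go]
  | cons num rest ih =>
    cases f0 <;> cases f00 <;>
      simp_all [has_007_inner, has_007_alt_go] <;>
      by_cases h0 : num = 0 <;> by_cases h7 : num = 7 <;>
      simp_all

lemma any_const (l : List Int) (c : Bool) : l.any (fun _ => c) = (!l.isEmpty && c) := by
  induction l with
  | nil => rfl
  | cons x xs ih => cases c <;> simp_all [List.any]

-- ===== VERDICT (by name: the statement is the Claim_ definition above) =====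
theorem has_007_spec : Claim_equal_has_007 := by
  intro numbers _
  unfold Spec_has_007 has_007 has_007_alt
  rw [any_const]
  match numbers with
  | [] => rfl
  | [a] => simp [has_007_alt_go]
  | a :: b :: rest =>
    have hne : (PySem.List.pyRange 0 ((((a :: b :: rest).length : Int)) - 1) 1) ≠ [] := by
      rw [PySem.List.pyRange_one_cons (by simp)]
      simp
    have h2 : (!(PySem.List.pyRange 0 ((((a :: b :: rest).length : Int)) - 1) 1).isEmpty) = true := by
      simpa [List.isEmpty_iff] using hne
    rw [h2, Bool.true_and]
    exact inner_eq_go _ false false (by simp)
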